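-- pv_equiv track=rewrite | github.com/sebstrand/aoc | 2023/17/day17.py | is_valid_move_p2
-- ===== SOURCE A (Python) =====
-- import itertools
--
-- def is_valid_move_p2(move, incomplete=True):
--     if len(move) == 1:
--         return True
--     elif 'NS' in move or 'SN' in move or 'EW' in move or 'WE' in move:
--         return False
--     elif len(move) >= 10 and ('N'*10 in move or 'S'*10 in move or 'W'*10 in move or 'E'*10 in move):
--         return False
--
--     if incomplete:
--         if move[-1] == move[-2]:
--             return True
--         else:
--             if len(move) < 5:
--                 return False
--             preceding = move[-6:-2]
--         return preceding == move[-2] * len(preceding)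
--     else:
--         if len(move) < 5:
--             return move == move[0] * len(move)
--         else:
--             groups = [len(list(g)) for _, g in itertools.groupby(move)]
--             return min(groups) >= 4
-- ===== SOURCE B (Python) =====
-- import itertools
--
-- def is_valid_move_p2(move, incomplete=True):
--     if len(move) == 1:
--         return True
--     runs = [(c, len(list(g))) for c, g in itertools.groupby(move)]
--     for (c1, _), (c2, _) in zip(runs, runs[1:]):
--         if {c1, c2} == {'N', 'S'} or {c1, c2} == {'E', 'W'}:
--             return False
--     if any(c in 'NSEW' and n >= 10 for c, n in runs):
--         return False
--     if incomplete:
--         if runs[-1][1] >= 2: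
--             return True
--         if len(move) < 5:
--             return False
--         # last run has length 1; the run before it must cover move[-6:-2]
--         need = 4 if len(move) >= 6 else 3
--         return runs[-2][1] >= need + 1
--     else:
--         if len(move) < 5:
--             return len(runs) == 1
--         return min(n for _, n in runs) >= 4
-- ===== Notes on version B (the rewrite author's own statement) =====
-- stated objective: alternative
-- what changed: B builds the run-length encoding of the move string once (itertools.groupby) and validates everything over runs (adjacent opposite-direction runs, run length >= 10, tail-run lengths for the incomplete check, run count / min run length for the complete check), replacing A's battery of substring searches and slice comparisons.
import Mathlib
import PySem

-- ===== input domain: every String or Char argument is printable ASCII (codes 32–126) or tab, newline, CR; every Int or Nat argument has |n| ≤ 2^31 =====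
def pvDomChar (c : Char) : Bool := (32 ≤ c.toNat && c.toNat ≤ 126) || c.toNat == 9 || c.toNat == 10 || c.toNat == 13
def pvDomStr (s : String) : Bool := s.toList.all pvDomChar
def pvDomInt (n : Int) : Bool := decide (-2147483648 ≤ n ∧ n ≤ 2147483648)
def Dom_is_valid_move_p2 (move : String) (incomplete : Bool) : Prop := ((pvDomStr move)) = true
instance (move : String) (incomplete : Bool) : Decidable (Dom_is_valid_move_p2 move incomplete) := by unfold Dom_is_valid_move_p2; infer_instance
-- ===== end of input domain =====

-- B validates over the run-length encoding of the move instead of A's substring searches and slice comparisons; equal on every nonempty move (objective: alternative).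

-- ===== PORT A =====
-- itertools.groupby on a list of chars: list of (key, group) for maximal runs of equal chars
def pyGroupby : List Char → List (Char × List Char)
  | [] => []
  | c :: t =>
    match pyGroupby t with
    | (c', g) :: rs => if c = c' then (c, c :: g) :: rs else (c, [c]) :: (c', g) :: rs
    | [] => [(c, [c])]

def is_valid_move_p2 (move : String) (incomplete : Bool) : Bool :=
  let l := move.toList
  if l.length = 1 then true
  else if PySem.Chars.isIn ['N','S'] l || PySem.Chars.isIn ['S','N'] l ||
          PySem.Chars.isIn ['E','W'] l || PySem.Chars.isIn ['W','E'] l then false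
  else if decide (10 ≤ l.length) &&
          (PySem.Chars.isIn (List.replicate 10 'N') l || PySem.Chars.isIn (List.replicate 10 'S') l ||
           PySem.Chars.isIn (List.replicate 10 'W') l || PySem.Chars.isIn (List.replicate 10 'E') l) then false
  else if incomplete then
    match PySem.List.pyGet? l (-1), PySem.List.pyGet? l (-2) with
    | some a, some b =>
      if a = b then true
      else if l.length < 5 then false
      else
        let preceding := PySem.List.slice l (some (-6)) (some (-2))
        preceding = List.replicate preceding.length b   -- preceding == move[-2] * len(preceding)
    | _, _ => false    -- IndexError (empty move); excluded by Pre_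
  else
    if l.length < 5 then
      match PySem.List.pyGet? l 0 with
      | some c0 => l = List.replicate l.length c0       -- move == move[0] * len(move)
      | none => false                                    -- IndexError (empty move); excluded by Pre_
    else
      let groups := (pyGroupby l).map (fun p => p.2.length)
      match PySem.List.min? groups (fun x => x) with
      | some m => decide (4 ≤ m)
      | none => false

-- ===== PORT B =====
-- {c1, c2} == {'N','S'} or {c1, c2} == {'E','W'} from Source B
def oppPair (c1 c2 : Char) : Bool :=
  (c1 == 'N' && c2 == 'S') || (c1 == 'S' && c2 == 'N') ||
  (c1 == 'E' && c2 == 'W') || (c1 == 'W' && c2 == 'E')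

def is_valid_move_p2_alt (move : String) (incomplete : Bool) : Bool :=
  let l := move.toList
  if l.length = 1 then true
  else
    let runs := (pyGroupby l).map (fun p => (p.1, p.2.length))
    if (runs.zip runs.tail).any (fun p => oppPair p.1.1 p.2.1) then false
    else if runs.any (fun p => (p.1 == 'N' || p.1 == 'S' || p.1 == 'E' || p.1 == 'W') && decide (10 ≤ p.2)) then false
    else if incomplete then
      match PySem.List.pyGet? runs (-1) with
      | some r =>
        if 2 ≤ r.2 then true
        else if l.length < 5 then false
        else
          match PySem.List.pyGet? runs (-2) with
          | some r2 => decide ((if 6 ≤ l.length then 4 else 3) + 1 ≤ r2.2)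
          | none => false
      | none => false     -- IndexError (empty move); excluded by Pre_
    else if l.length < 5 then
      decide (runs.length = 1)
    else
      match PySem.List.min? (runs.map (fun p => p.2)) (fun x => x) with
      | some m => decide (4 ≤ m)
      | none => false

-- ===== PRECONDITION & SPEC =====
-- Pre_ excludes only the empty string, on which A raises IndexError (move[-1] / move[0]).
def Pre_is_valid_move_p2 (move : String) (incomplete : Bool) : Prop := move ≠ ""
instance (move : String) (incomplete : Bool) : Decidable (Pre_is_valid_move_p2 move incomplete) := by unfold Pre_is_valid_move_p2; infer_instance
def pvWitness_is_valid_move_p2 : String × Bool := ("NNNN", true)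

def Spec_is_valid_move_p2 (move : String) (incomplete : Bool) (out : Bool) : Prop := out = is_valid_move_p2_alt move incomplete
instance (move : String) (incomplete : Bool) (out : Bool) : Decidable (Spec_is_valid_move_p2 move incomplete out) := by unfold Spec_is_valid_move_p2; infer_instance

-- ===== CLAIM (what is proved, stated in full; the proofs are below) =====
def Claim_equal_is_valid_move_p2 : Prop := ∀ (move : String) (incomplete : Bool), Dom_is_valid_move_p2 move incomplete → Pre_is_valid_move_p2 move incomplete → Spec_is_valid_move_p2 move incomplete (is_valid_move_p2 move incomplete)

-- ===== LEMMAS AND PROOFS =====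

-- the run-length encoding (key, run length) both ports consult
def runsOf (l : List Char) : List (Char × Nat) := (pyGroupby l).map (fun p => (p.1, p.2.length))

theorem runsOf_cons (c : Char) (t : List Char) :
    runsOf (c :: t) = match runsOf t with
      | (c', n) :: rs => if c = c' then (c, n + 1) :: rs else (c, 1) :: (c', n) :: rs
      | [] => [(c, 1)] := by
  cases h : pyGroupby t with
  | nil => simp [runsOf, pyGroupby, h]
  | cons p rs =>
    obtain ⟨c', g⟩ := p
    by_cases hc : c = c' <;> simp [runsOf, pyGroupby, h, hc]

theorem runsOf_eq_nil_iff (l : List Char) : runsOf l = [] ↔ l = [] := by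
  cases l with
  | nil => simp [runsOf, pyGroupby]
  | cons c t =>
    rw [runsOf_cons]
    cases h : runsOf t with
    | nil => simp
    | cons p rs => obtain ⟨c', n⟩ := p; simp only [h]; by_cases hc : c = c' <;> simp [hc]

theorem runsOf_pos (l : List Char) : ∀ p ∈ runsOf l, 1 ≤ p.2 := by
  induction l with
  | nil => simp [runsOf, pyGroupby]
  | cons c t ih =>
    rw [runsOf_cons]
    cases h : runsOf t with
    | nil => simp
    | cons p rs =>
      obtain ⟨c', n⟩ := p
      have ih' := h ▸ ih
      by_cases hc : c = c' <;> simp_all <;> intro a b hab <;> exact ih'.2 a b hab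

theorem runsOf_flat (l : List Char) : (runsOf l).flatMap (fun p => List.replicate p.2 p.1) = l := by
  induction l with
  | nil => simp [runsOf, pyGroupby]
  | cons c t ih =>
    rw [runsOf_cons]
    cases h : runsOf t with
    | nil =>
      rw [h] at ih; simp_all [runsOf_eq_nil_iff]
    | cons p rs =>
      obtain ⟨c', n⟩ := p
      rw [h] at ih
      by_cases hc : c = c' <;> simp_all [List.replicate_succ]

theorem runsOf_chain (l : List Char) : (runsOf l).IsChain (fun p q => p.1 ≠ q.1) := by
  induction l with
  | nil => simp [runsOf, pyGroupby]
  | cons c t ih =>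
    rw [runsOf_cons]
    cases h : runsOf t with
    | nil => simp
    | cons p rs =>
      obtain ⟨c', n⟩ := p
      rw [h] at ih
      by_cases hc : c = c' <;> simp_all [List.isChain_cons]


theorem runsOf_cons_nil (c : Char) : runsOf [c] = [(c, 1)] := rfl

theorem runsOf_cons_eqkey {t : List Char} {c : Char} {n : Nat} {rs : List (Char × Nat)}
    (h : runsOf t = (c, n) :: rs) : runsOf (c :: t) = (c, n + 1) :: rs := by
  rw [runsOf_cons, h]
  simp

theorem runsOf_cons_nekey {t : List Char} {c c' : Char} {n : Nat} {rs : List (Char × Nat)}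
    (h : runsOf t = (c', n) :: rs) (hne : c ≠ c') : runsOf (c :: t) = (c, 1) :: (c', n) :: rs := by
  rw [runsOf_cons, h]
  simp [hne]

theorem ex_head (a x : Char) (b k : Nat) (u : List (Char × Nat)) :
    (∃ n rs, (a, b) :: u = (x, n) :: rs ∧ k ≤ n) ↔ (x = a ∧ k ≤ b) := by
  constructor
  · rintro ⟨n, rs, heq, hle⟩
    injection heq with h1 h2
    injection h1 with h3 h4
    exact ⟨h3.symm, h4 ▸ hle⟩
  · rintro ⟨rfl, hle⟩
    exact ⟨b, u, rfl, hle⟩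

theorem rep_prefix (l : List Char) (x : Char) (k : Nat) (hk : 1 ≤ k) :
    List.replicate k x <+: l ↔ ∃ n rs, runsOf l = (x, n) :: rs ∧ k ≤ n := by
  induction l generalizing k with
  | nil =>
    obtain ⟨m, rfl⟩ : ∃ m, k = m + 1 := ⟨k - 1, by omega⟩
    simp [runsOf, pyGroupby, List.replicate_succ]
  | cons c t ih =>
    obtain ⟨m, rfl⟩ : ∃ m, k = m + 1 := ⟨k - 1, by omega⟩
    rw [List.replicate_succ, List.cons_prefix_cons]
    cases h : runsOf t with
    | nil =>
      have ht : t = [] := (runsOf_eq_nil_iff t).mp h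
      subst ht
      rw [runsOf_cons_nil, ex_head]
      simp [List.replicate_eq_nil_iff]
    | cons p rs' =>
      obtain ⟨c', n'⟩ := p
      by_cases hc : c = c'
      · subst hc
        rw [runsOf_cons_eqkey h, ex_head]
        by_cases hm : m = 0
        · subst hm
          simp
        · rw [ih m (by omega), h, ex_head]
          constructor
          · rintro ⟨h1, _, hle⟩; exact ⟨h1, by omega⟩
          · rintro ⟨h1, hle⟩; exact ⟨h1, h1, by omega⟩
      · rw [runsOf_cons_nekey h hc, ex_head]
        by_cases hm : m = 0
        · subst hm
          simp [List.nil_prefix]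
        · rw [ih m (by omega), h, ex_head]
          constructor
          · rintro ⟨h1, h2, hle⟩; exact absurd (h1.symm.trans h2) hc
          · rintro ⟨h1, hle⟩; omega

theorem rep_infix (l : List Char) (x : Char) (k : Nat) (hk : 1 ≤ k) :
    List.replicate k x <:+: l ↔ ∃ p ∈ runsOf l, p.1 = x ∧ k ≤ p.2 := by
  induction l with
  | nil =>
    obtain ⟨m, rfl⟩ : ∃ m, k = m + 1 := ⟨k - 1, by omega⟩
    simp [runsOf, pyGroupby, List.replicate_succ]
  | cons c t ih =>
    rw [List.infix_cons_iff, rep_prefix (c :: t) x k hk, ih]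
    cases h : runsOf t with
    | nil =>
      have ht : t = [] := (runsOf_eq_nil_iff t).mp h
      subst ht
      rw [runsOf_cons_nil, ex_head]
      simp
      exact fun _ => eq_comm
    | cons p rs' =>
      obtain ⟨c', n'⟩ := p
      by_cases hc : c = c'
      · subst hc
        rw [runsOf_cons_eqkey h, ex_head]
        simp only [List.mem_cons, h]
        constructor
        · rintro (⟨h1, hle⟩ | ⟨p, hp, h1, hle⟩)
          · exact ⟨(c, n' + 1), Or.inl rfl, h1.symm, hle⟩
          · rcases hp with rfl | hp
            · exact ⟨(c, n' + 1), Or.inl rfl, h1, by simpa using Nat.le_succ_of_le hle⟩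
            · exact ⟨p, Or.inr hp, h1, hle⟩
        · rintro ⟨p, hp, h1, hle⟩
          rcases hp with rfl | hp
          · exact Or.inl ⟨h1.symm, hle⟩
          · exact Or.inr ⟨p, Or.inr hp, h1, hle⟩
      · rw [runsOf_cons_nekey h hc, ex_head]
        simp only [List.mem_cons, h]
        constructor
        · rintro (⟨h1, hle⟩ | ⟨p, hp, h1, hle⟩)
          · exact ⟨(c, 1), Or.inl rfl, h1.symm, hle⟩
          · exact ⟨p, Or.inr hp, h1, hle⟩
        · rintro ⟨p, hp, h1, hle⟩
          rcases hp with rfl | hp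
          · exact Or.inl ⟨h1.symm, hle⟩
          · exact Or.inr ⟨p, hp, h1, hle⟩

theorem pair_infix (l : List Char) (x y : Char) (hxy : x ≠ y) :
    [x, y] <:+: l ↔ ∃ p ∈ (runsOf l).zip (runsOf l).tail, p.1.1 = x ∧ p.2.1 = y := by
  induction l with
  | nil => simp [runsOf, pyGroupby]
  | cons c t ih =>
    rw [List.infix_cons_iff, ih]
    have hpre : [x, y] <+: c :: t ↔ x = c ∧ ∃ n rs, runsOf t = (y, n) :: rs := by
      rw [List.cons_prefix_cons]
      constructor
      · rintro ⟨h1, h2⟩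
        refine ⟨h1, ?_⟩
        have := (rep_prefix t y 1 le_rfl).mp (by simpa using h2)
        obtain ⟨n, rs, heq, _⟩ := this
        exact ⟨n, rs, heq⟩
      · rintro ⟨h1, n, rs, heq⟩
        refine ⟨h1, ?_⟩
        have : List.replicate 1 y <+: t := (rep_prefix t y 1 le_rfl).mpr ⟨n, rs, heq, runsOf_pos t (y, n) (heq ▸ List.mem_cons_self) ⟩
        simpa using this
    rw [hpre]
    cases h : runsOf t with
    | nil =>
      have ht : t = [] := (runsOf_eq_nil_iff t).mp h
      subst ht
      rw [runsOf_cons_nil]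
      simp
    | cons p rs' =>
      obtain ⟨c', n'⟩ := p
      by_cases hc : c = c'
      · subst hc
        rw [runsOf_cons_eqkey h]
        cases rs' with
        | nil =>
          simp [ex_head]
          intro h1 h2
          exact hxy (h1.trans h2)
        | cons q rs'' =>
          simp only [List.zip_cons_cons, List.tail_cons, List.mem_cons]
          constructor
          · rintro (⟨rfl, n, rs, heq⟩ | ⟨p, hp, h1, h2⟩)
            · exfalso
              injection heq with h1 _
              injection h1 with h3 _
              exact hxy (h3 ▸ rfl)
            · rcases hp with rfl | hp
              · exact ⟨((c, n' + 1), q), Or.inl rfl, h1, h2⟩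
              · exact ⟨p, Or.inr hp, h1, h2⟩
          · rintro ⟨p, hp, h1, h2⟩
            rcases hp with rfl | hp
            · exact Or.inr ⟨((c, n'), q), Or.inl rfl, h1, h2⟩
            · exact Or.inr ⟨p, Or.inr hp, h1, h2⟩
      · rw [runsOf_cons_nekey h hc]
        simp only [List.zip_cons_cons, List.tail_cons, List.mem_cons]
        constructor
        · rintro (⟨rfl, n, rs, heq⟩ | ⟨p, hp, h1, h2⟩)
          · injection heq with h1 _
            injection h1 with h3 _
            exact ⟨((x, 1), (c', n')), Or.inl rfl, rfl, h3⟩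
          · exact ⟨p, Or.inr hp, h1, h2⟩
        · rintro ⟨p, hp, h1, h2⟩
          rcases hp with rfl | hp
          · exact Or.inl ⟨h1.symm, n', rs', by have h2' : c' = y := h2; subst h2'; rfl⟩
          · exact Or.inr ⟨p, hp, h1, h2⟩

theorem run_le_len (l : List Char) : ∀ p ∈ runsOf l, p.2 ≤ l.length := by
  intro p hp
  conv_rhs => rw [← runsOf_flat l]
  rw [List.length_flatMap]
  have hm : (List.replicate p.2 p.1).length ∈ (runsOf l).map (fun q => (List.replicate q.2 q.1).length) :=
    List.mem_map_of_mem hp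
  have hle := List.single_le_sum (l := (runsOf l).map (fun q => (List.replicate q.2 q.1).length)) (fun x _ => Nat.zero_le x) _ hm
  simpa using hle

theorem pairs_eq (l : List Char) :
    (PySem.Chars.isIn ['N','S'] l || PySem.Chars.isIn ['S','N'] l ||
     PySem.Chars.isIn ['E','W'] l || PySem.Chars.isIn ['W','E'] l)
    = ((runsOf l).zip (runsOf l).tail).any (fun p => oppPair p.1.1 p.2.1) := by
  rw [Bool.eq_iff_iff]
  simp only [Bool.or_eq_true, List.any_eq_true, PySem.Chars.isIn_iff_infix]
  rw [pair_infix l 'N' 'S' (by decide), pair_infix l 'S' 'N' (by decide),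
      pair_infix l 'E' 'W' (by decide), pair_infix l 'W' 'E' (by decide)]
  constructor
  · rintro (((⟨p, hp, h1, h2⟩ | ⟨p, hp, h1, h2⟩) | ⟨p, hp, h1, h2⟩) | ⟨p, hp, h1, h2⟩) <;>
      exact ⟨p, hp, by simp [oppPair, h1, h2]⟩
  · rintro ⟨p, hp, hopp⟩
    simp only [oppPair, Bool.or_eq_true, Bool.and_eq_true, beq_iff_eq] at hopp
    rcases hopp with ((⟨h1, h2⟩ | ⟨h1, h2⟩) | ⟨h1, h2⟩) | ⟨h1, h2⟩
    · exact Or.inl (Or.inl (Or.inl ⟨p, hp, h1, h2⟩))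
    · exact Or.inl (Or.inl (Or.inr ⟨p, hp, h1, h2⟩))
    · exact Or.inl (Or.inr ⟨p, hp, h1, h2⟩)
    · exact Or.inr ⟨p, hp, h1, h2⟩

theorem rep10_eq (l : List Char) :
    (decide (10 ≤ l.length) &&
      (PySem.Chars.isIn (List.replicate 10 'N') l || PySem.Chars.isIn (List.replicate 10 'S') l ||
       PySem.Chars.isIn (List.replicate 10 'W') l || PySem.Chars.isIn (List.replicate 10 'E') l))
    = (runsOf l).any (fun p => (p.1 == 'N' || p.1 == 'S' || p.1 == 'E' || p.1 == 'W') && decide (10 ≤ p.2)) := by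
  rw [Bool.eq_iff_iff]
  simp only [Bool.and_eq_true, Bool.or_eq_true, List.any_eq_true, PySem.Chars.isIn_iff_infix,
    decide_eq_true_eq, beq_iff_eq]
  rw [rep_infix l 'N' 10 (by omega), rep_infix l 'S' 10 (by omega),
      rep_infix l 'W' 10 (by omega), rep_infix l 'E' 10 (by omega)]
  constructor
  · rintro ⟨hlen, ((⟨p, hp, h1, h2⟩ | ⟨p, hp, h1, h2⟩) | ⟨p, hp, h1, h2⟩) | ⟨p, hp, h1, h2⟩⟩
    · exact ⟨p, hp, Or.inl (Or.inl (Or.inl h1)), h2⟩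
    · exact ⟨p, hp, Or.inl (Or.inl (Or.inr h1)), h2⟩
    · exact ⟨p, hp, Or.inr h1, h2⟩
    · exact ⟨p, hp, Or.inl (Or.inr h1), h2⟩
  · rintro ⟨p, hp, hkey, h2⟩
    refine ⟨le_trans h2 (run_le_len l p hp), ?_⟩
    rcases hkey with ((h1 | h1) | h1) | h1
    · exact Or.inl (Or.inl (Or.inl ⟨p, hp, h1, h2⟩))
    · exact Or.inl (Or.inl (Or.inr ⟨p, hp, h1, h2⟩))
    · exact Or.inr ⟨p, hp, h1, h2⟩
    · exact Or.inl (Or.inr ⟨p, hp, h1, h2⟩)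

theorem mid_run (F : List Char) (c₂ c : Char) (n₂ : Nat) (hn₂ : 1 ≤ n₂)
    (hlast : ∀ x, F.getLast? = some x → x ≠ c₂)
    (h5 : 5 ≤ F.length + n₂ + 1) :
    ((F ++ List.replicate n₂ c₂ ++ [c]).drop ((F.length + n₂ + 1) - 6)).take
        (((F.length + n₂ + 1) - 2) - ((F.length + n₂ + 1) - 6))
      = List.replicate (((F.length + n₂ + 1) - 2) - ((F.length + n₂ + 1) - 6)) c₂
    ↔ (if 6 ≤ F.length + n₂ + 1 then 4 else 3) + 1 ≤ n₂ := by
  have hlenl : (F ++ List.replicate n₂ c₂ ++ [c]).length = F.length + n₂ + 1 := by simp; omega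
  set L := F.length with hL
  set len := L + n₂ + 1 with hlen
  set d := len - 6 with hd
  set need := (len - 2) - d with hneed
  have hneed_eq : (if 6 ≤ len then (4:Nat) else 3) = need := by
    split <;> omega
  rw [hneed_eq]
  have hgetmid : ∀ i, L ≤ i → i < L + n₂ → (F ++ List.replicate n₂ c₂ ++ [c])[i]? = some c₂ := by
    intro i h1 h2
    rw [List.append_assoc, List.getElem?_append_right h1,
        List.getElem?_append_left (by simp; omega), List.getElem?_replicate]
    rw [if_pos (by omega : i - L < n₂)]
  constructor
  · intro heq
    by_contra hlt
    rw [Nat.not_le] at hlt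
    have hL1 : 1 ≤ L := by omega
    have h1 := congrArg (fun l => l[L - 1 - d]?) heq
    dsimp only at h1
    rw [List.getElem?_take_of_lt (by omega), List.getElem?_drop] at h1
    rw [(by omega : d + (L - 1 - d) = L - 1)] at h1
    rw [List.append_assoc, List.getElem?_append_left (by omega : L - 1 < L)] at h1
    rw [List.getElem?_replicate, if_pos (by omega)] at h1
    have hF : F.getLast? = some c₂ := by
      rw [List.getLast?_eq_getElem?, ← hL, (by omega : L - 1 = L - 1)]
      exact h1
    exact hlast c₂ hF rfl
  · intro hge
    apply List.ext_getElem?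
    intro j
    by_cases hj : j < need
    · rw [List.getElem?_take_of_lt hj, List.getElem?_drop,
          List.getElem?_replicate, if_pos hj]
      exact hgetmid (d + j) (by omega) (by omega)
    · rw [List.getElem?_eq_none (by
          rw [List.length_take, List.length_drop, hlenl]; omega),
        List.getElem?_eq_none (by rw [List.length_replicate]; omega)]

theorem flat_last (rs : List (Char × Nat)) (hpos : ∀ p ∈ rs, 1 ≤ p.2) :
    (rs.flatMap (fun p => List.replicate p.2 p.1)).getLast? = rs.getLast?.map (fun p => p.1) := by
  rcases List.eq_nil_or_concat rs with rfl | ⟨u, p, rfl⟩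
  · simp
  · rw [List.concat_eq_append, List.flatMap_append]
    simp only [List.flatMap_cons, List.flatMap_nil, List.append_nil]
    have hp := hpos p (by simp)
    rw [List.getLast?_append_of_ne_nil _ (by simp; omega), List.getLast?_replicate,
        if_neg (by omega : ¬ p.2 = 0)]
    simp

theorem key_mem (l : List Char) : ∀ p ∈ runsOf l, p.1 ∈ l := by
  intro p hp
  rw [← runsOf_flat l]
  exact List.mem_flatMap.mpr ⟨p, hp,
    List.mem_replicate.mpr ⟨by have := runsOf_pos l p hp; omega, rfl⟩⟩

theorem tail_eq (l : List Char) (h2 : 2 ≤ l.length) :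
    (match PySem.List.pyGet? l (-1), PySem.List.pyGet? l (-2) with
     | some a, some b =>
       if a = b then true
       else if l.length < 5 then false
       else decide (PySem.List.slice l (some (-6)) (some (-2)) =
              List.replicate (PySem.List.slice l (some (-6)) (some (-2))).length b)
     | _, _ => false)
    = (match PySem.List.pyGet? (runsOf l) (-1) with
       | some r =>
         if 2 ≤ r.2 then true
         else if l.length < 5 then false
         else
           match PySem.List.pyGet? (runsOf l) (-2) with
           | some r2 => decide ((if 6 ≤ l.length then 4 else 3) + 1 ≤ r2.2)
           | none => false
       | none => false) := by
  obtain ⟨rs, ⟨c, n⟩, hrs⟩ : ∃ rs p, runsOf l = rs ++ [p] := by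
    rcases List.eq_nil_or_concat (runsOf l) with h | ⟨u, p, h⟩
    · exact absurd ((runsOf_eq_nil_iff l).mp h)
        (by intro h'; rw [h'] at h2; simp at h2)
    · exact ⟨u, p, by rw [h, List.concat_eq_append]⟩
  have hn : 1 ≤ n := runsOf_pos l (c, n) (by rw [hrs]; simp)
  set F := rs.flatMap (fun p => List.replicate p.2 p.1) with hF
  have hflat : F ++ List.replicate n c = l := by
    have h0 := runsOf_flat l
    rw [hrs, List.flatMap_append] at h0
    simpa [← hF] using h0
  have hlen : l.length = F.length + n := by rw [← hflat]; simp
  have hB1 : PySem.List.pyGet? (runsOf l) (-1) = some (c, n) := by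
    rw [hrs]; exact PySem.List.pyGet?_neg_one_append_singleton _ _
  have hA1 : PySem.List.pyGet? l (-1) = some c := by
    rw [PySem.List.pyGet?_neg_one, ← hflat,
        List.getLast?_append_of_ne_nil _ (by simp; omega), List.getLast?_replicate,
        if_neg (by omega : ¬ n = 0)]
  rw [hA1, hB1]
  by_cases hn2 : 2 ≤ n
  · have hA2 : PySem.List.pyGet? l (-2) = some c := by
      rw [PySem.List.pyGet?_neg_ofNat l 2 (by omega) (by omega)]
      rw [← hflat, List.getElem?_append_right (by simp; omega), List.getElem?_replicate]
      rw [if_pos (by simp; omega)]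
    rw [hA2]
    simp [hn2]
  · have hn1 : n = 1 := by omega
    subst hn1
    have hFne : F ≠ [] := by
      intro h
      rw [h] at hlen
      simp at hlen
      omega
    obtain ⟨rs', ⟨c₂, n₂⟩, hrs'⟩ : ∃ u p, rs = u ++ [p] := by
      rcases List.eq_nil_or_concat rs with h | ⟨u, p, h⟩
      · exact absurd (by rw [hF, h]; rfl) hFne
      · exact ⟨u, p, by rw [h, List.concat_eq_append]⟩
    have hn₂ : 1 ≤ n₂ := runsOf_pos l (c₂, n₂) (by rw [hrs, hrs']; simp)
    set F' := rs'.flatMap (fun p => List.replicate p.2 p.1) with hF'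
    have hFsplit : F = F' ++ List.replicate n₂ c₂ := by
      rw [hF, hrs', List.flatMap_append]
      simp [← hF']
    have hchain : List.IsChain (fun p q => p.1 ≠ q.1) (rs' ++ [(c₂, n₂), (c, 1)]) := by
      have hch := runsOf_chain l
      rw [hrs, hrs'] at hch
      simpa using hch
    have hc₂c : c₂ ≠ c := by
      rw [List.isChain_append] at hchain
      exact hchain.2.1.rel_head
    have hlast' : ∀ x, F'.getLast? = some x → x ≠ c₂ := by
      intro x hx hxc
      have hfl := flat_last rs' (fun p hp => runsOf_pos l p (by rw [hrs, hrs']; exact List.mem_append_left _ (List.mem_append_left _ hp)))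
      rw [← hF', hx] at hfl
      obtain ⟨p, hp, hpx⟩ := Option.map_eq_some_iff.mp hfl.symm
      rw [List.isChain_append] at hchain
      exact hchain.2.2 p hp (c₂, n₂) rfl (by rw [hpx, hxc])
    have hlen' : l.length = F'.length + n₂ + 1 := by
      rw [hlen, hFsplit]
      simp
    have hA2 : PySem.List.pyGet? l (-2) = some c₂ := by
      rw [PySem.List.pyGet?_neg_ofNat l 2 (by omega) (by omega)]
      rw [← hflat, List.getElem?_append_left (by simp; omega), hFsplit,
          List.getElem?_append_right (by simp; omega), List.getElem?_replicate]
      rw [if_pos (by simp; omega)]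
    rw [hA2]
    dsimp only
    rw [if_neg (show ¬ c = c₂ from fun h => hc₂c h.symm)]
    rw [if_neg (by omega : ¬ (2:Nat) ≤ 1)]
    by_cases h5 : l.length < 5
    · rw [if_pos h5, if_pos h5]
    · rw [if_neg h5, if_neg h5]
      have hB2 : PySem.List.pyGet? (runsOf l) (-2) = some (c₂, n₂) := by
        have hshape : runsOf l = (rs' ++ [(c₂, n₂)]) ++ [(c, 1)] := by rw [hrs, hrs']
        rw [hshape, PySem.List.pyGet?_neg_ofNat _ 2 (by omega) (by simp)]
        have hlen2 : (rs' ++ [(c₂, n₂)] ++ [(c, 1)]).length - 2 = rs'.length := by simp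
        rw [hlen2, List.append_assoc, List.getElem?_append_right (le_refl _)]
        simp
      rw [hB2]
      have hl_eq : l = F' ++ List.replicate n₂ c₂ ++ [c] := by
        rw [← hflat, hFsplit]
        simp
      have hsl : PySem.List.slice l (some (-6)) (some (-2)) =
          (l.drop (l.length - 6)).take ((l.length - 2) - (l.length - 6)) := by
        simp [PySem.List.slice]
      have hsllen : (PySem.List.slice l (some (-6)) (some (-2))).length =
          (l.length - 2) - (l.length - 6) := by
        rw [PySem.List.length_slice]
        simp
      rw [hsllen, hsl, hlen', hl_eq]
      rw [decide_eq_decide.mpr (mid_run F' c₂ c n₂ hn₂ hlast' (by omega))]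

theorem single_run (l : List Char) (c0 : Char) (h0 : l[0]? = some c0) :
    (l = List.replicate l.length c0) ↔ (runsOf l).length = 1 := by
  have hlne : l ≠ [] := by rintro rfl; simp at h0
  constructor
  · intro hrep
    cases h : runsOf l with
    | nil => exact absurd ((runsOf_eq_nil_iff l).mp h) hlne
    | cons p rs =>
      cases rs with
      | nil => rfl
      | cons q rs' =>
        exfalso
        have hne : p.1 ≠ q.1 := by
          have hc := runsOf_chain l
          rw [h] at hc
          exact hc.rel_head
        have hp : p.1 ∈ l := key_mem l p (by rw [h]; simp)
        have hq : q.1 ∈ l := key_mem l q (by rw [h]; simp)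
        rw [hrep] at hp hq
        exact hne ((List.eq_of_mem_replicate hp).trans (List.eq_of_mem_replicate hq).symm)
  · intro hlen
    obtain ⟨p, h⟩ : ∃ p, runsOf l = [p] := by
      cases h : runsOf l with
      | nil => rw [h] at hlen; simp at hlen
      | cons p rs =>
        rw [h] at hlen
        simp at hlen
        exact ⟨p, by rw [hlen]⟩
    have hflat := runsOf_flat l
    rw [h] at hflat
    simp only [List.flatMap_cons, List.flatMap_nil, List.append_nil] at hflat
    have hc0 : c0 = p.1 := by
      have hpos := runsOf_pos l p (by rw [h]; simp)
      rw [← hflat, List.getElem?_replicate, if_pos (by omega)] at h0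
      exact (Option.some_injective _ h0).symm
    rw [← hflat, hc0]
    simp


theorem ports_agree : ∀ (move : String) (inc : Bool), move ≠ "" →
    is_valid_move_p2 move inc = is_valid_move_p2_alt move inc := by
  intro move inc hpre
  unfold is_valid_move_p2 is_valid_move_p2_alt
  dsimp only
  have hlne : move.toList ≠ [] := fun h => hpre (String.toList_inj.mp (by simpa using h))
  set l := move.toList with hl
  have hrEq : (pyGroupby l).map (fun p => (p.1, p.2.length)) = runsOf l := rfl
  by_cases h1 : l.length = 1
  · simp only [if_pos h1]
  · simp only [if_neg h1]
    have h2 : 2 ≤ l.length := by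
      have h0 : l.length ≠ 0 := by simpa using hlne
      omega
    rw [hrEq, pairs_eq l, rep10_eq l]
    by_cases hp : ((runsOf l).zip (runsOf l).tail).any (fun p => oppPair p.1.1 p.2.1) = true
    · rw [if_pos hp, if_pos hp]
    · rw [if_neg hp, if_neg hp]
      by_cases hq : (runsOf l).any (fun p => (p.1 == 'N' || p.1 == 'S' || p.1 == 'E' || p.1 == 'W') && decide (10 ≤ p.2)) = true
      · rw [if_pos hq, if_pos hq]
      · rw [if_neg hq, if_neg hq]
        cases inc with
        | true =>
          rw [if_pos rfl, if_pos rfl]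
          exact tail_eq l h2
        | false =>
          rw [if_neg Bool.false_ne_true, if_neg Bool.false_ne_true]
          by_cases h5 : l.length < 5
          · rw [if_pos h5, if_pos h5]
            obtain ⟨c0, h0⟩ : ∃ c0, l[0]? = some c0 :=
              ⟨l[0]'(by omega), List.getElem?_eq_getElem (by omega)⟩
            rw [PySem.List.pyGet?_zero, h0]
            exact decide_eq_decide.mpr (single_run l c0 h0)
          · rw [if_neg h5, if_neg h5]
            have hgroups : (runsOf l).map (fun p => p.2) = (pyGroupby l).map (fun p => p.2.length) := by
              rw [← hrEq, List.map_map]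
              rfl
            rw [hgroups]

-- ===== VERDICT (by name: the statement is the Claim_ definition above) =====
theorem is_valid_move_p2_spec : Claim_equal_is_valid_move_p2 := by
  intro move incomplete _ hpre
  unfold Spec_is_valid_move_p2
  exact ports_agree move incomplete hpre
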